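-- pv_equiv track=rewrite | github.com/Leapense/problems | 22293번: base2i/B_P4_base2i.py | P4
-- ===== SOURCE A (Python) =====
-- def P4(x,y):
--     a, b = -2 * y, 2 * x
--     digits = []
--
--     while a or b:
--         r = a % 4
--         digits.append(r)
--         a, b = b // 2, -(a - r) // 2
--
--     if not digits:
--         digits.append(0)
--
--     right = str(digits[0])
--     left_digits = digits[::-1][:-1]
--     if not left_digits:
--         left_digits = [0]
--
--     while len(left_digits) > 1 and left_digits[0] == 0:
--         left_digits.pop(0)
--
--     return "".join(map(str, left_digits)) + "." + right
-- ===== SOURCE B (Python) =====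
-- def _neg4(m):
--     # base-(-4) digit list of m, least significant first, no trailing zeros
--     digs = []
--     while m:
--         digs.append(m % 4)
--         m = -(m // 4)
--     return digs
--
-- def _interleave(e, o):
--     # e at even positions, o at odd positions, padded with 0s in between
--     out = []
--     while e or o:
--         out.append(e[0] if e else 0)
--         e, o = o, e[1:]
--     return out
--
-- def P4(x, y):
--     # (2i)^2 = -4: even-position digits encode -2*y, odd-position digits encode x
--     digits = _interleave(_neg4(-2 * y), _neg4(x)) or [0]
--     left = digits[1:][::-1]
--     k = 0
--     while k < len(left) and left[k] == 0:
--         k += 1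
--     left = left[k:] or [0]
--     return "".join(map(str, left)) + "." + str(digits[0])
-- ===== Notes on version B (the rewrite author's own statement) =====
-- stated objective: alternative
-- what changed: Exploits (2i)^2 = -4: B computes the base-(-4) digit sequences of -2*y and of x with two independent division/mod loops and interleaves them, instead of A's single coupled loop rotating the two-variable state (a,b).
import Mathlib
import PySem

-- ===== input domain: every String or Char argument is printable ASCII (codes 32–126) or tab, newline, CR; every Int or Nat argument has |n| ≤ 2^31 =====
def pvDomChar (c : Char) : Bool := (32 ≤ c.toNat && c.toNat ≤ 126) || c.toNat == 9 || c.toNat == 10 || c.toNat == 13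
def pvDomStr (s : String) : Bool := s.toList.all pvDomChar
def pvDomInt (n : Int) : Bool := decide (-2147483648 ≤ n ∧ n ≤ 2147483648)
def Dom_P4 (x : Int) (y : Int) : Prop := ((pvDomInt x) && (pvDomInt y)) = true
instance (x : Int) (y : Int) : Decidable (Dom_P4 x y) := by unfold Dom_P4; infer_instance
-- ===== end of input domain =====

-- B: different decomposition using (2i)^2 = -4 — two independent base-(-4) digit loops (for -2y and x) interleaved, instead of A's single coupled loop rotating the two-variable state (a,b).


-- shared totality guard: pvMu bounds the remaining iterations of a 'm = -(m // 4)' loop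
def pvMu (t : Int) : Nat := t.natAbs + (if t < 0 then 1 else 0)

-- ===== PORT A =====
-- the while loop:  while a or b: r = a % 4; digits.append(r); a, b = b // 2, -(a - r) // 2
-- (the Nat argument is fuel — a totality guard only; P4 passes enough for the loop to run to completion)
def P4go : Nat → Int → Int → List Int
  | 0, _, _ => []
  | f + 1, a, b =>
    if a ≠ 0 ∨ b ≠ 0 then
      PySem.Int.mod a 4 ::
        P4go f (PySem.Int.floordiv b 2) (PySem.Int.floordiv (-(a - PySem.Int.mod a 4)) 2)
    else []

-- the while loop:  while len(left_digits) > 1 and left_digits[0] == 0: left_digits.pop(0)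
def P4strip : List Int → List Int
  | a :: d :: t => if a = 0 then P4strip (d :: t) else a :: d :: t
  | l => l

def P4 (x : Int) (y : Int) : String :=
  let a := -2 * y
  let b := 2 * x
  let digits0 := P4go (2 * (pvMu a + pvMu (PySem.Int.floordiv b 2)) + 2) a b
  let digits := if digits0 = [] then [0] else digits0      -- if not digits: digits.append(0)
  let right := PySem.Int.toStr (digits.headD 0)            -- digits[0]; digits is nonempty here
  -- digits[::-1][:-1] : [::-1] is exactly reverse (PySem.List.slice?_none_none_neg_one)
  let left0 := PySem.List.slice digits.reverse none (some (-1))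
  let left1 := if left0 = [] then [0] else left0
  let left2 := P4strip left1
  PySem.Str.join "" (left2.map PySem.Int.toStr) ++ "." ++ right

-- ===== PORT B =====
-- _neg4's loop:  while m: digs.append(m % 4); m = -(m // 4)      (fueled totality guard)
def neg4go : Nat → Int → List Int
  | 0, _ => []
  | f + 1, m =>
    if m ≠ 0 then PySem.Int.mod m 4 :: neg4go f (-(PySem.Int.floordiv m 4)) else []

def neg4digits (m : Int) : List Int := neg4go (pvMu m + 1) m

-- _interleave's loop:  while e or o: out.append(e[0] if e else 0); e, o = o, e[1:]
def itlgo : Nat → List Int → List Int → List Int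
  | 0, _, _ => []
  | f + 1, e, o =>
    match e, o with
    | [], [] => []
    | [], o :: os => 0 :: itlgo f (o :: os) []
    | d :: es, o => d :: itlgo f o es

def itl (e o : List Int) : List Int := itlgo (2 * (e.length + o.length) + 2) e o

def P4_alt (x : Int) (y : Int) : String :=
  let digits0 := itl (neg4digits (-2 * y)) (neg4digits x)
  let digits := if digits0 = [] then [0] else digits0                 -- … or [0]
  let left0 := (PySem.List.slice digits (some 1) none).reverse        -- digits[1:][::-1]
  let left1 := left0.dropWhile (· == 0)                               -- the k-scan skipping leading zeros, left = left[k:]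
  let left := if left1 = [] then [0] else left1                       -- … or [0]
  PySem.Str.join "" (left.map PySem.Int.toStr) ++ "." ++ PySem.Int.toStr (digits.headD 0)

-- ===== PRECONDITION & SPEC =====
def Spec_P4 (x : Int) (y : Int) (out : String) : Prop := out = P4_alt x y
instance (x : Int) (y : Int) (out : String) : Decidable (Spec_P4 x y out) := by unfold Spec_P4; infer_instance

-- ===== CLAIM (what is proved, stated in full; the proofs are below) =====
def Claim_equal_P4 : Prop := ∀ (x : Int) (y : Int), Dom_P4 x y → Spec_P4 x y (P4 x y)

-- ===== LEMMAS AND PROOFS =====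

lemma pv_fd2 (a : Int) : PySem.Int.floordiv a 2 = a / 2 :=
  PySem.Int.floordiv_eq_ediv_of_pos (by omega)
lemma pv_fd4 (a : Int) : PySem.Int.floordiv a 4 = a / 4 :=
  PySem.Int.floordiv_eq_ediv_of_pos (by omega)
lemma pv_md4 (a : Int) : PySem.Int.mod a 4 = a % 4 :=
  PySem.Int.mod_eq_emod_of_pos (by omega)

lemma pvMu_step (u : Int) (hu : u ≠ 0) : pvMu (-(PySem.Int.floordiv u 4)) < pvMu u := by
  simp only [pv_fd4, pvMu]
  split_ifs <;> omega

lemma pv_half_double (v : Int) : PySem.Int.floordiv (2 * v) 2 = v := by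
  rw [pv_fd2]; omega

lemma pv_newb (u : Int) :
    PySem.Int.floordiv (-(u - PySem.Int.mod u 4)) 2 = 2 * -PySem.Int.floordiv u 4 := by
  rw [pv_fd2, pv_fd4, pv_md4]; omega

-- fuel irrelevance for B's digit loop
lemma neg4go_congr : ∀ (f g : Nat) (m : Int), pvMu m < f → pvMu m < g →
    neg4go f m = neg4go g m := by
  intro f
  induction f with
  | zero => intro g m hf; omega
  | succ f ihf =>
    intro g m hf hg
    cases g with
    | zero => omega
    | succ g =>
      rw [neg4go, neg4go]
      by_cases hm : m = 0
      · simp [hm]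
      · have hs := pvMu_step m hm
        rw [if_pos hm, if_pos hm, ihf g _ (by omega) (by omega)]

lemma neg4digits_nil : neg4digits 0 = [] := by
  rw [neg4digits]; rfl

lemma neg4digits_cons (m : Int) (hm : m ≠ 0) :
    neg4digits m = PySem.Int.mod m 4 :: neg4digits (-PySem.Int.floordiv m 4) := by
  have hs := pvMu_step m hm
  rw [neg4digits, neg4go, if_pos hm, neg4digits]
  rw [neg4go_congr (pvMu m) (pvMu (-PySem.Int.floordiv m 4) + 1) _ (by omega) (by omega)]

lemma neg4digits_ne_nil (v : Int) (hv : v ≠ 0) : neg4digits v ≠ [] := by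
  rw [neg4digits_cons v hv]; simp

-- fuel irrelevance for B's interleave loop
lemma itlgo_congr : ∀ (f g : Nat) (e o : List Int),
    2 * (e.length + o.length) + (if e = [] then 1 else 0) < f →
    2 * (e.length + o.length) + (if e = [] then 1 else 0) < g →
    itlgo f e o = itlgo g e o := by
  intro f
  induction f with
  | zero => intro g e o hf; omega
  | succ f ihf =>
    intro g e o hf hg
    cases g with
    | zero => omega
    | succ g =>
      match e, o with
      | [], [] => rw [itlgo, itlgo]
      | [], o :: os =>
        simp at hf hg
        rw [itlgo, itlgo, ihf g (o :: os) [] (by simp; omega) (by simp; omega)]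
      | d :: es, o =>
        simp [List.cons_ne_nil] at hf hg
        rw [itlgo, itlgo]
        refine congrArg _ (ihf g o es ?_ ?_) <;> split_ifs <;> simp_all <;> omega

lemma itl_nil_nil : itl [] [] = [] := rfl

lemma itl_nil_cons (c : Int) (rest : List Int) :
    itl [] (c :: rest) = 0 :: itl (c :: rest) [] := by
  rw [itl, itl, itlgo]
  refine congrArg _ (itlgo_congr _ _ _ _ ?_ ?_) <;> simp

lemma itl_cons (d : Int) (es o : List Int) : itl (d :: es) o = d :: itl o es := by
  rw [itl, itl, itlgo]
  refine congrArg _ (itlgo_congr _ _ _ _ ?_ ?_) <;> (split_ifs <;> simp_all <;> omega)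

-- the heart: A's coupled loop computes the interleaving of the two base-(-4) digit streams
lemma digitsEqAux : ∀ (F : Nat) (u v : Int),
    2 * (pvMu u + pvMu v) + (if u = 0 then 1 else 0) < F →
    P4go F u (2 * v) = itl (neg4digits u) (neg4digits v) := by
  intro F
  induction F with
  | zero => intro u v hm; omega
  | succ F ih =>
    intro u v hm
    rw [P4go]
    by_cases hu : u = 0
    · subst hu
      by_cases hv : v = 0
      · subst hv
        rw [if_neg (by norm_num), neg4digits_nil, itl_nil_nil]
      · obtain ⟨c, rest, hcr⟩ := List.exists_cons_of_ne_nil (neg4digits_ne_nil v hv)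
        rw [if_pos (Or.inr (show (2 : Int) * v ≠ 0 by omega)), neg4digits_nil, hcr,
          itl_nil_cons, ← hcr, ← neg4digits_nil]
        have hmod : PySem.Int.mod 0 4 = 0 := by rw [pv_md4]; norm_num
        rw [hmod, pv_half_double, show -((0 : Int) - 0) = 0 by norm_num,
          show PySem.Int.floordiv (0 : Int) 2 = 2 * 0 by rw [pv_fd2]; norm_num]
        rw [ih v 0 (by simp only [pvMu] at hm ⊢; split_ifs at hm ⊢ <;> omega)]
    · rw [if_pos (Or.inl hu), pv_half_double, pv_newb, neg4digits_cons u hu, itl_cons]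
      have hs := pvMu_step u hu
      rw [ih v (-PySem.Int.floordiv u 4) (by split_ifs at hm ⊢ <;> omega)]

lemma digitsEq (u v : Int) :
    P4go (2 * (pvMu u + pvMu (PySem.Int.floordiv (2 * v) 2)) + 2) u (2 * v) =
      itl (neg4digits u) (neg4digits v) := by
  refine digitsEqAux _ u v ?_
  rw [pv_half_double]
  split_ifs <;> omega

-- strip equivalence: A's pop-while-leading-zero (keeping ≥ 1) equals B's dropWhile-then-default
lemma stripEq (l : List Int) :
    P4strip (if l = [] then [0] else l) =
      (if l.dropWhile (· == 0) = [] then [0] else l.dropWhile (· == 0)) := by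
  induction l with
  | nil => simp [P4strip]
  | cons h t ihl =>
    by_cases h0 : h = 0
    · subst h0
      have hstep : P4strip (0 :: t) = P4strip (if t = [] then [0] else t) := by
        cases t with
        | nil => rfl
        | cons d t' => rw [P4strip]; simp
      rw [if_neg (show ¬(0 :: t = ([] : List Int)) by simp), hstep]
      simpa using ihl
    · have hfix : P4strip (h :: t) = h :: t := by
        cases t with
        | nil => rfl
        | cons d t' => rw [P4strip]; simp [h0]
      simp [hfix, h0]

lemma rev_dropLast_eq_tail_rev (l : List Int) : l.reverse.dropLast = l.tail.reverse := by
  cases l with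
  | nil => simp
  | cons a t => simp

-- ===== VERDICT (by name: the statement is the Claim_ definition above) =====
theorem P4_spec : Claim_equal_P4 := by
  intro x y _
  unfold Spec_P4 P4 P4_alt
  dsimp only
  rw [digitsEq (-2 * y) x]
  simp only [PySem.List.slice_to_neg_one, PySem.List.slice_from_one,
    rev_dropLast_eq_tail_rev]
  set digits := if itl (neg4digits (-2 * y)) (neg4digits x) = [] then [0]
      else itl (neg4digits (-2 * y)) (neg4digits x) with hd
  rw [stripEq digits.tail.reverse]
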